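-- pv_equiv track=rewrite | github.com/Alb-O/pw-rs | scripts/extract_clutter_patterns.py | categorize_partial_selectors
-- ===== SOURCE A (Python) =====
-- def categorize_partial_selectors(selectors: list[str]) -> dict[str, list[str]]:
--     """Group partial selectors into categories for readability."""
--     categories = {
--         "ads": [],
--         "navigation": [],
--         "header_footer": [],
--         "sidebar": [],
--         "social": [],
--         "comments": [],
--         "auth": [],
--         "newsletter": [],
--         "article_meta": [],
--         "post_meta": [],
--         "author": [],
--         "related": [],
--         "misc": [],
--     }
--
--     # Keywords for categorization
--     category_keywords = {
--         "ads": ["ad", "advert", "promo", "sponsor", "banner"],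
--         "navigation": ["nav", "menu", "breadcrumb", "pagination", "skip", "jump"],
--         "header_footer": ["header", "footer", "copyright", "masthead", "topbar"],
--         "sidebar": ["sidebar", "widget", "aside", "rail"],
--         "social": ["social", "share", "facebook", "twitter", "instagram", "rss"],
--         "comments": ["comment", "disqus", "discuss", "feedback", "response"],
--         "auth": ["login", "sign", "register", "access-wall", "paywall", "gated"],
--         "newsletter": ["newsletter", "subscribe", "signup", "email", "donate"],
--         "article_meta": ["article-", "article_", "article__"],
--         "post_meta": ["post-", "post_", "entry-", "byline", "dateline", "timestamp", "pub"],
--         "author": ["author", "bio", "avatar", "profile", "contributor"],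
--         "related": ["related", "recommend", "more-", "read-next", "keep-reading", "popular", "trending", "recent"],
--     }
--
--     for selector in selectors:
--         sel_lower = selector.lower()
--         categorized = False
--
--         for category, keywords in category_keywords.items():
--             if any(kw in sel_lower for kw in keywords):
--                 categories[category].append(selector)
--                 categorized = True
--                 break
--
--         if not categorized:
--             categories["misc"].append(selector)
--
--     # Remove empty categories
--     return {k: v for k, v in categories.items() if v}
-- ===== SOURCE B (Python) =====
-- # Different decomposition: one flat keyword->category table scanned per selector to
-- # compute its label, then one outer loop over the fixed category order building each
-- # group by filtering on labels (instead of A's append-into-a-dict-of-lists pass).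
--
-- _FLAT_KEYWORDS = [
--     ("ad", "ads"), ("advert", "ads"), ("promo", "ads"), ("sponsor", "ads"), ("banner", "ads"),
--     ("nav", "navigation"), ("menu", "navigation"), ("breadcrumb", "navigation"),
--     ("pagination", "navigation"), ("skip", "navigation"), ("jump", "navigation"),
--     ("header", "header_footer"), ("footer", "header_footer"), ("copyright", "header_footer"),
--     ("masthead", "header_footer"), ("topbar", "header_footer"),
--     ("sidebar", "sidebar"), ("widget", "sidebar"), ("aside", "sidebar"), ("rail", "sidebar"),
--     ("social", "social"), ("share", "social"), ("facebook", "social"),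
--     ("twitter", "social"), ("instagram", "social"), ("rss", "social"),
--     ("comment", "comments"), ("disqus", "comments"), ("discuss", "comments"),
--     ("feedback", "comments"), ("response", "comments"),
--     ("login", "auth"), ("sign", "auth"), ("register", "auth"),
--     ("access-wall", "auth"), ("paywall", "auth"), ("gated", "auth"),
--     ("newsletter", "newsletter"), ("subscribe", "newsletter"), ("signup", "newsletter"),
--     ("email", "newsletter"), ("donate", "newsletter"),
--     ("article-", "article_meta"), ("article_", "article_meta"), ("article__", "article_meta"),
--     ("post-", "post_meta"), ("post_", "post_meta"), ("entry-", "post_meta"),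
--     ("byline", "post_meta"), ("dateline", "post_meta"), ("timestamp", "post_meta"), ("pub", "post_meta"),
--     ("author", "author"), ("bio", "author"), ("avatar", "author"),
--     ("profile", "author"), ("contributor", "author"),
--     ("related", "related"), ("recommend", "related"), ("more-", "related"),
--     ("read-next", "related"), ("keep-reading", "related"), ("popular", "related"),
--     ("trending", "related"), ("recent", "related"),
-- ]
--
-- _CATEGORY_ORDER = [
--     "ads", "navigation", "header_footer", "sidebar", "social", "comments",
--     "auth", "newsletter", "article_meta", "post_meta", "author", "related", "misc",
-- ]
--
--
-- def _label(selector):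
--     low = selector.lower()
--     return next((cat for kw, cat in _FLAT_KEYWORDS if kw in low), "misc")
--
--
-- def categorize_partial_selectors(selectors):
--     """Group partial selectors into categories for readability."""
--     labels = [_label(s) for s in selectors]
--     result = {}
--     for name in _CATEGORY_ORDER:
--         group = [s for s, l in zip(selectors, labels) if l == name]
--         if group:
--             result[name] = group
--     return result
-- ===== Notes on version B (the rewrite author's own statement) =====
-- stated objective: alternative
-- what changed: Replaces A's per-selector pass that appends into a pre-built dict of category keyword lists (inner break loop with an any() generator per category) by a flat keyword-to-category table used to label each selector once, followed by one outer loop over the fixed category order that builds each group by filtering on the labels.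
import Mathlib
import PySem

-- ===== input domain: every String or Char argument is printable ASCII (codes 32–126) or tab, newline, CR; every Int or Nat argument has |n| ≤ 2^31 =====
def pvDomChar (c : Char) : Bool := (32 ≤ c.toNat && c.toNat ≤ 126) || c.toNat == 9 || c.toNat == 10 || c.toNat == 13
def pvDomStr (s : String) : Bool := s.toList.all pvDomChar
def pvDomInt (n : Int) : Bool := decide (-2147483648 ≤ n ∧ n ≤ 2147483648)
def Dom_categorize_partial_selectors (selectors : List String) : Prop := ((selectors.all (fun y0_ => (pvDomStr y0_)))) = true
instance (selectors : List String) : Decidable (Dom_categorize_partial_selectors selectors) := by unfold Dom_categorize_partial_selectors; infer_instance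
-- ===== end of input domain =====

-- B replaces A's append-into-a-dict-of-lists pass (inner break loop over a dict of keyword
-- lists) by a flat keyword→category table labelling each selector once, then one outer loop
-- over the fixed category order building each group by filtering on labels (objective: alternative).

-- ===== PORT A =====
def pvInitCategories : PySem.Dict String (List String) :=
  PySem.Dict.mk [("ads", []), ("navigation", []), ("header_footer", []), ("sidebar", []),
    ("social", []), ("comments", []), ("auth", []), ("newsletter", []), ("article_meta", []),
    ("post_meta", []), ("author", []), ("related", []), ("misc", [])]

def pvCategoryKeywords : List (String × List String) :=
  [("ads", ["ad", "advert", "promo", "sponsor", "banner"]),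
   ("navigation", ["nav", "menu", "breadcrumb", "pagination", "skip", "jump"]),
   ("header_footer", ["header", "footer", "copyright", "masthead", "topbar"]),
   ("sidebar", ["sidebar", "widget", "aside", "rail"]),
   ("social", ["social", "share", "facebook", "twitter", "instagram", "rss"]),
   ("comments", ["comment", "disqus", "discuss", "feedback", "response"]),
   ("auth", ["login", "sign", "register", "access-wall", "paywall", "gated"]),
   ("newsletter", ["newsletter", "subscribe", "signup", "email", "donate"]),
   ("article_meta", ["article-", "article_", "article__"]),
   ("post_meta", ["post-", "post_", "entry-", "byline", "dateline", "timestamp", "pub"]),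
   ("author", ["author", "bio", "avatar", "profile", "contributor"]),
   ("related", ["related", "recommend", "more-", "read-next", "keep-reading", "popular", "trending", "recent"])]

-- the inner 'for category, keywords in …: if any(…): append; break' loop: first category
-- any of whose keywords occurs in sel_lower (the append is done by the caller at the break)
def pvFirstCat (cats : List (String × List String)) (selLower : String) : Option String :=
  match cats with
  | [] => none
  | (c, kws) :: rest =>
      if kws.any (fun kw => PySem.Str.isIn kw selLower) then some c
      else pvFirstCat rest selLower

def categorize_partial_selectors (selectors : List String) : List (String × List String) :=
  let final := selectors.foldl (fun cats selector =>
    let selLower := PySem.Str.lower selector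
    match pvFirstCat pvCategoryKeywords selLower with
    | some c => cats.modify c [] (fun v => v ++ [selector])
    | none => cats.modify "misc" [] (fun v => v ++ [selector])) pvInitCategories
  -- '{k: v for k, v in categories.items() if v}' (keys are distinct, order preserved)
  final.items.filter (fun p => !p.2.isEmpty)

-- ===== PORT B =====
def pvFlatKeywords : List (String × String) :=
  [("ad", "ads"), ("advert", "ads"), ("promo", "ads"), ("sponsor", "ads"), ("banner", "ads"),
   ("nav", "navigation"), ("menu", "navigation"), ("breadcrumb", "navigation"),
   ("pagination", "navigation"), ("skip", "navigation"), ("jump", "navigation"),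
   ("header", "header_footer"), ("footer", "header_footer"), ("copyright", "header_footer"),
   ("masthead", "header_footer"), ("topbar", "header_footer"),
   ("sidebar", "sidebar"), ("widget", "sidebar"), ("aside", "sidebar"), ("rail", "sidebar"),
   ("social", "social"), ("share", "social"), ("facebook", "social"),
   ("twitter", "social"), ("instagram", "social"), ("rss", "social"),
   ("comment", "comments"), ("disqus", "comments"), ("discuss", "comments"),
   ("feedback", "comments"), ("response", "comments"),
   ("login", "auth"), ("sign", "auth"), ("register", "auth"),
   ("access-wall", "auth"), ("paywall", "auth"), ("gated", "auth"),
   ("newsletter", "newsletter"), ("subscribe", "newsletter"), ("signup", "newsletter"),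
   ("email", "newsletter"), ("donate", "newsletter"),
   ("article-", "article_meta"), ("article_", "article_meta"), ("article__", "article_meta"),
   ("post-", "post_meta"), ("post_", "post_meta"), ("entry-", "post_meta"),
   ("byline", "post_meta"), ("dateline", "post_meta"), ("timestamp", "post_meta"), ("pub", "post_meta"),
   ("author", "author"), ("bio", "author"), ("avatar", "author"),
   ("profile", "author"), ("contributor", "author"),
   ("related", "related"), ("recommend", "related"), ("more-", "related"),
   ("read-next", "related"), ("keep-reading", "related"), ("popular", "related"),
   ("trending", "related"), ("recent", "related")]

def pvCategoryOrder : List String :=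
  ["ads", "navigation", "header_footer", "sidebar", "social", "comments",
   "auth", "newsletter", "article_meta", "post_meta", "author", "related", "misc"]

-- next((cat for kw, cat in _FLAT_KEYWORDS if kw in low), "misc")
def pvLabel (selector : String) : String :=
  let low := PySem.Str.lower selector
  ((pvFlatKeywords.find? (fun p => PySem.Str.isIn p.1 low)).map Prod.snd).getD "misc"

def categorize_partial_selectors_alt (selectors : List String) : List (String × List String) :=
  let labels := selectors.map pvLabel
  pvCategoryOrder.foldl (fun result name =>
    let group := ((selectors.zip labels).filter (fun p => p.2 == name)).map Prod.fst
    if group.isEmpty then result else result ++ [(name, group)]) []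

-- ===== PRECONDITION & SPEC =====
def Spec_categorize_partial_selectors (selectors : List String) (out : List (String × List String)) : Prop := out = categorize_partial_selectors_alt selectors
instance (selectors : List String) (out : List (String × List String)) : Decidable (Spec_categorize_partial_selectors selectors out) := by unfold Spec_categorize_partial_selectors; infer_instance

-- ===== CLAIM (what is proved, stated in full; the proofs are below) =====
def Claim_equal_categorize_partial_selectors : Prop := ∀ (selectors : List String), Dom_categorize_partial_selectors selectors → Spec_categorize_partial_selectors selectors (categorize_partial_selectors selectors)

-- ===== LEMMAS AND PROOFS =====

-- the flat table is the per-category keyword lists flattened, each keyword paired with its category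
theorem pvFlat_eq : pvFlatKeywords
    = pvCategoryKeywords.flatMap (fun c => c.2.map (fun kw => (kw, c.1))) := by rfl

-- scanning the flattened table for the first matching pair = A's first-category-with-a-match loop
theorem find?_flatMap_eq_firstCat (cats : List (String × List String)) (low : String) :
    ((cats.flatMap (fun c => c.2.map (fun kw => (kw, c.1)))).find?
        (fun p => PySem.Str.isIn p.1 low)).map Prod.snd = pvFirstCat cats low := by
  induction cats with
  | nil => rfl
  | cons c rest ih =>
      obtain ⟨name, kws⟩ := c
      rw [List.flatMap_cons, List.find?_append, List.find?_map, pvFirstCat]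
      have hpred : ((fun p => PySem.Str.isIn p.1 low) ∘ fun kw => (kw, name))
          = (fun kw => PySem.Str.isIn kw low) := rfl
      rw [hpred]
      by_cases h : kws.any (fun kw => PySem.Str.isIn kw low)
      · obtain ⟨kw, hmem, hkw⟩ := List.any_eq_true.mp h
        rcases hf : List.find? (fun kw => PySem.Str.isIn kw low) kws with _ | k
        · exact absurd hkw (List.find?_eq_none.mp hf kw hmem)
        · simp only [Option.map_some, Option.some_or]
          rw [if_pos h]
      · have hf : List.find? (fun kw => PySem.Str.isIn kw low) kws = none :=
          List.find?_eq_none.mpr (fun x hx hc => h (List.any_eq_true.mpr ⟨x, hx, hc⟩))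
        simp only [hf, Option.map_none, Option.none_or]
        rw [if_neg h]
        exact ih

-- A's branch on the inner loop's outcome assigns exactly B's label
theorem keyA_eq_label (sel : String) :
    (match pvFirstCat pvCategoryKeywords (PySem.Str.lower sel) with
     | some c => c
     | none => "misc") = pvLabel sel := by
  show _ = ((pvFlatKeywords.find?
      (fun p => PySem.Str.isIn p.1 (PySem.Str.lower sel))).map Prod.snd).getD "misc"
  rw [pvFlat_eq, find?_flatMap_eq_firstCat]
  cases pvFirstCat pvCategoryKeywords (PySem.Str.lower sel) <;> rfl

-- B's label, written out (pure unfolding of the local binding)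
theorem label_explicit (sel : String) : pvLabel sel
    = ((pvFlatKeywords.find?
        (fun p => PySem.Str.isIn p.1 (PySem.Str.lower sel))).map Prod.snd).getD "misc" := rfl

-- B's label always names one of the thirteen categories
theorem label_mem (sel : String) : pvLabel sel ∈ pvCategoryOrder := by
  rw [label_explicit]
  rcases h : pvFlatKeywords.find? (fun p => PySem.Str.isIn p.1 (PySem.Str.lower sel)) with _ | p
  · rw [h]
    simp [pvCategoryOrder]
  · rw [h]
    have hp := List.mem_of_find?_eq_some h
    have hall : ∀ q ∈ pvFlatKeywords, q.2 ∈ pvCategoryOrder := by decide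
    simpa using hall p hp

-- unfolding A's and B's definitions (zeta-reduction of the local bindings only)
theorem A_explicit (selectors : List String) :
    categorize_partial_selectors selectors
    = (selectors.foldl (fun cats selector =>
        match pvFirstCat pvCategoryKeywords (PySem.Str.lower selector) with
        | some c => cats.modify c [] (fun v => v ++ [selector])
        | none => cats.modify "misc" [] (fun v => v ++ [selector])) pvInitCategories).items.filter
          (fun p => !p.2.isEmpty) := rfl

theorem B_explicit (selectors : List String) :
    categorize_partial_selectors_alt selectors
    = pvCategoryOrder.foldl (fun result name =>
        if (((selectors.zip (selectors.map pvLabel)).filter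
              (fun p => p.2 == name)).map Prod.fst).isEmpty then result
        else result ++ [(name,
          ((selectors.zip (selectors.map pvLabel)).filter
              (fun p => p.2 == name)).map Prod.fst)]) [] := rfl

-- A's dict loop, rewritten with the label function
theorem foldA_eq (selectors : List String) :
    selectors.foldl (fun cats selector =>
      match pvFirstCat pvCategoryKeywords (PySem.Str.lower selector) with
      | some c => cats.modify c [] (fun v => v ++ [selector])
      | none => cats.modify "misc" [] (fun v => v ++ [selector])) pvInitCategories
    = selectors.foldl (fun cats selector =>
        cats.modify (pvLabel selector) [] (fun v => v ++ [selector])) pvInitCategories := by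
  apply PySem.List.foldl_congr_mem
  intro cats sel _
  rw [← keyA_eq_label sel]
  cases pvFirstCat pvCategoryKeywords (PySem.Str.lower sel) <;> rfl

-- a literal dict all of whose values are [] looks up to [] everywhere
theorem getD_nil_of_all (l : List (String × List String))
    (h : ∀ p ∈ l, p.2 = ([] : List String)) (c : String) :
    (PySem.Dict.mk l).getD c [] = [] := by
  induction l with
  | nil => rfl
  | cons p rest ih =>
      obtain ⟨k, v⟩ := p
      rw [PySem.Dict.getD_eq_get?_getD, PySem.Dict.get?_mk_cons]
      by_cases hk : (k == c) = true
      · rw [if_pos hk]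
        exact h (k, v) List.mem_cons_self
      · rw [if_neg hk, ← PySem.Dict.getD_eq_get?_getD]
        exact ih (fun q hq => h q (List.mem_cons_of_mem _ hq))

-- every lookup in the final dict is the filter of the selectors carrying that label
theorem getD_foldA (selectors : List String) (c : String) :
    (selectors.foldl (fun cats selector =>
        cats.modify (pvLabel selector) [] (fun v => v ++ [selector])) pvInitCategories).getD c []
    = selectors.filter (fun s => pvLabel s == c) := by
  have hmap : selectors.foldl (fun cats selector =>
      cats.modify (pvLabel selector) [] (fun v => v ++ [selector])) pvInitCategories
      = (selectors.map (fun s => (pvLabel s, s))).foldl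
          (fun d p => d.modify p.1 [] (fun v => v ++ [p.2])) pvInitCategories := by
    rw [List.foldl_map]
  rw [hmap, PySem.Dict.getD_foldl_modify_append]
  have hinit : pvInitCategories.getD c [] = [] :=
    getD_nil_of_all _ (by intro p hp; fin_cases hp <;> rfl) c
  rw [hinit, List.filter_map, List.map_map]
  simp only [Function.comp_def]
  exact List.map_id' _

-- the final dict's key list is exactly the fixed category order
theorem keys_foldA (selectors : List String) :
    (selectors.foldl (fun cats selector =>
        cats.modify (pvLabel selector) [] (fun v => v ++ [selector])) pvInitCategories).keys
    = pvCategoryOrder := by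
  have h := PySem.Dict.keys_foldl_modify_key selectors pvLabel []
    (fun _ sel => fun v => v ++ [sel]) pvInitCategories
  rw [h, PySem.Set.update_eq_append_filter]
  have hkeys : pvInitCategories.keys = pvCategoryOrder := rfl
  rw [hkeys]
  have hnil : (PySem.Set.ofList (selectors.map pvLabel)).filter
      (fun y => !(PySem.Set.contains pvCategoryOrder y)) = [] := by
    rw [List.filter_eq_nil_iff]
    intro y hy
    have hy' : y ∈ selectors.map pvLabel := (PySem.Set.mem_ofList _ _).mp hy
    obtain ⟨s, _, rfl⟩ := List.mem_map.mp hy'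
    simpa using label_mem s
  rw [hnil, List.append_nil]

-- zipping a list with its own map pairs each element with its label
theorem zip_map_self {α β : Type} (f : α → β) (xs : List α) :
    xs.zip (xs.map f) = xs.map (fun x => (x, f x)) := by
  induction xs with
  | nil => rfl
  | cons x rest ih => simp [ih]

-- B's per-category group is the same filter of the selectors
theorem groupB_eq (selectors : List String) (name : String) :
    (((selectors.zip (selectors.map pvLabel)).filter (fun p => p.2 == name)).map Prod.fst)
    = selectors.filter (fun s => pvLabel s == name) := by
  rw [zip_map_self, List.filter_map, List.map_map]
  simp only [Function.comp_def]
  exact List.map_id' _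

-- ===== VERDICT (by name: the statement is the Claim_ definition above) =====
theorem categorize_partial_selectors_spec : Claim_equal_categorize_partial_selectors := by
  intro selectors _
  show categorize_partial_selectors selectors = categorize_partial_selectors_alt selectors
  rw [A_explicit, B_explicit, foldA_eq]
  have hnodup : (selectors.foldl (fun cats selector =>
      cats.modify (pvLabel selector) [] (fun v => v ++ [selector])) pvInitCategories).keys.Nodup := by
    rw [keys_foldA]; decide
  rw [PySem.Dict.items_eq_map_keys _ hnodup [], keys_foldA]
  have hrw : ∀ name, ((selectors.zip (selectors.map pvLabel)).filter
      (fun p => p.2 == name)).map Prod.fst = selectors.filter (fun s => pvLabel s == name) :=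
    groupB_eq selectors
  simp only [hrw, getD_foldA]
  have hfold := PySem.List.foldl_append_if
    (fun name => !(selectors.filter (fun s => pvLabel s == name)).isEmpty)
    (fun name => (name, selectors.filter (fun s => pvLabel s == name))) pvCategoryOrder []
  rw [show (pvCategoryOrder.foldl (fun result name =>
      if (selectors.filter (fun s => pvLabel s == name)).isEmpty then result
      else result ++ [(name, selectors.filter (fun s => pvLabel s == name))]) [])
    = pvCategoryOrder.foldl (fun result name =>
      if !(selectors.filter (fun s => pvLabel s == name)).isEmpty then
        result ++ [(name, selectors.filter (fun s => pvLabel s == name))]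
      else result) [] from PySem.List.foldl_congr_mem _ _ _ _
      (by intro acc name _; cases h : (selectors.filter (fun s => pvLabel s == name)).isEmpty <;> rfl)]
  rw [hfold, List.nil_append, List.filter_map]
  congr 1
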